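-- pv_equiv track=rewrite | github.com/bsummy/Markov-Comp202-A2 | markov.py | get_grams
-- ===== SOURCE A (Python) =====
-- def get_grams(text, k):
--     ''' (string, int) -> dict
--     Takes string text and positive integer k to return a dictionary of k grams (with values being the
--     number of times a trailing character occurs the k-gram).
--
--     >>> get_grams('lobwobdob', 2)
--     {'lo': {'b': 1}, 'ob': {'w': 1, 'd': 1}, 'bw': {'o': 1}, 'wo': {'b': 1}, 'bd': {'o': 1}, 'do': {'b': 1}}
--
--     >>> get_grams("LOL", 1)
--     {'L': {'O': 1}, 'O': {'L': 1}}
--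
--     >>> get_grams("hello", 2)
--     {'he': {'l': 1}, 'el': {'l': 1}, 'll': {'o': 1}}
--
--     >>> get_grams("hello", 6)
--     {}
--     '''
--     grams_dict = {}
--
--     for index in range(len(text) - 1):
--         if not (index + k >= len(text)): #preventing index error due to len(text)
--             value = text[index : index + k] #isolating the k-gram
--
--             if value not in grams_dict: #first instance seeing k-gram
--                 grams_dict[value] = {}
--                 next_value = text[index + k]
--                 if next_value not in grams_dict[value]: #checking for new char trailing k-gram
--                     grams_dict[value][next_value] = 1
--
--             else: #occurs if k-gram seen previously; checks char trailing k-gram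
--                 next_value = text[index + k]
--                 if next_value not in grams_dict[value]: #checking for new char trailing k-gram
--                     grams_dict[value][next_value] = 1
--                 else: #if char trailing k-gram isn't new
--                     grams_dict[value][next_value] += 1
--
--     return grams_dict
-- ===== SOURCE B (Python) =====
-- def get_grams(text, k):
--     # Two staged passes: first group the trailing chars by k-gram into lists,
--     # then turn each group's char list into its count dict.
--     n = len(text)
--     groups = {}
--     for i in range(n - 1):
--         if i + k < n:
--             groups.setdefault(text[i:i+k], []).append(text[i+k])
--     result = {}
--     for gram, chars in groups.items():
--         cnt = {}
--         for c in chars: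
--             cnt[c] = cnt.get(c, 0) + 1
--         result[gram] = cnt
--     return result
-- ===== Notes on version B (the rewrite author's own statement) =====
-- stated objective: simpler
-- what changed: Instead of building the nested count dict directly in one branch-heavy pass, B first groups the trailing chars by k-gram into lists (setdefault/append) and then, in a second pass, turns each group's char list into its count dict.
import Mathlib
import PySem

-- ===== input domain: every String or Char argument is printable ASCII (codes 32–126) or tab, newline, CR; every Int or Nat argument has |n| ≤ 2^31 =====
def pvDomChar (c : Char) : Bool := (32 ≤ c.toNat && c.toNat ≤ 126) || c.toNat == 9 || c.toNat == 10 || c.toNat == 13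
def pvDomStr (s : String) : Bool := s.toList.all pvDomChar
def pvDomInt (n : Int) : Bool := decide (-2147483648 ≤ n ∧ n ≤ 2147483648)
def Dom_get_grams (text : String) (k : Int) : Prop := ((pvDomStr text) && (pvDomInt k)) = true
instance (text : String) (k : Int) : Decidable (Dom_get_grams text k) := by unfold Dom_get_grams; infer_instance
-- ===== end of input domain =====

-- B replaces A's single branch-heavy nested-dict pass by two staged passes: group the trailing
-- chars by k-gram into lists, then turn each group's char list into its count dict
-- (objective: simpler; not claimed faster).

-- ===== PORT A =====
-- A-side helper: the (k-gram, trailing char) pair read at index i (text[i:i+k], text[i+k])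
def pvPair (cs : List Char) (k i : Int) : List Char × Char :=
  (PySem.List.slice cs (some i) (some (i + k)), PySem.List.pyGetD cs (i + k) ' ')

-- A's loop body for one index (the branches in A's order); total via pyGetD, exact under Pre_
def pvStepA (d : PySem.Dict (List Char) (PySem.Dict Char Int)) (p : List Char × Char) :
    PySem.Dict (List Char) (PySem.Dict Char Int) :=
  if d.contains p.1 = false then
    let d1 := d.insert p.1 PySem.Dict.empty
    if (d1.getD p.1 PySem.Dict.empty).contains p.2 = false then
      d1.insert p.1 ((d1.getD p.1 PySem.Dict.empty).insert p.2 1)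
    else d1
  else
    let inner := d.getD p.1 PySem.Dict.empty
    if inner.contains p.2 = false then d.insert p.1 (inner.insert p.2 1)
    else d.insert p.1 (inner.insert p.2 (inner.getD p.2 0 + 1))

def get_grams (text : String) (k : Int) : List (String × List (String × Int)) :=
  let cs := text.toList
  let d := (PySem.List.pyRange 0 (PySem.List.len cs - 1) 1).foldl
    (fun d i => if ¬(i + k ≥ PySem.List.len cs) then pvStepA d (pvPair cs k i) else d)
    PySem.Dict.empty
  d.items.map (fun e => (String.ofList e.1, e.2.items.map (fun f => (String.ofList [f.1], f.2))))

-- ===== PORT B =====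
-- stage 1: groups.setdefault(text[i:i+k], []).append(text[i+k])  — on a dict this is exactly
-- "insert gram (getD gram [] ++ [char])" (insert at end when new, update in place when seen);
-- stage 2: per group, cnt[c] = cnt.get(c, 0) + 1, result[gram] = cnt (result keys are the
-- groups' distinct keys in order, so the result dict is this item list).
def get_grams_alt (text : String) (k : Int) : List (String × List (String × Int)) :=
  let cs := text.toList
  let n := PySem.List.len cs
  let groups := (PySem.List.pyRange 0 (n - 1) 1).foldl
    (fun (d : PySem.Dict (List Char) (List Char)) i =>
      if i + k < n then
        d.insert (PySem.List.slice cs (some i) (some (i + k)))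
          (d.getD (PySem.List.slice cs (some i) (some (i + k))) []
            ++ [PySem.List.pyGetD cs (i + k) ' '])
      else d)
    PySem.Dict.empty
  groups.items.map (fun gc =>
    (String.ofList gc.1,
      (gc.2.foldl (fun (cnt : PySem.Dict Char Int) c => cnt.insert c (cnt.getD c 0 + 1))
        PySem.Dict.empty).items.map (fun f => (String.ofList [f.1], f.2))))

-- ===== PRECONDITION & SPEC =====
-- Pre_ excludes exactly the inputs where A raises IndexError (text[index + k] with
-- index + k < -len(text), reachable iff len(text) ≥ 2 and k < -len(text)); B raises there too.
def Pre_get_grams (text : String) (k : Int) : Prop :=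
  text.toList.length ≤ 1 ∨ -(text.toList.length : Int) ≤ k
instance (text : String) (k : Int) : Decidable (Pre_get_grams text k) := by
  unfold Pre_get_grams; infer_instance
def pvWitness_get_grams : String × Int := ("hello", 2)

def Spec_get_grams (text : String) (k : Int) (out : List (String × List (String × Int))) : Prop := out = get_grams_alt text k
instance (text : String) (k : Int) (out : List (String × List (String × Int))) : Decidable (Spec_get_grams text k out) := by unfold Spec_get_grams; infer_instance

-- ===== CLAIM (what is proved, stated in full; the proofs are below) =====
def Claim_equal_get_grams : Prop := ∀ (text : String) (k : Int), Dom_get_grams text k → Pre_get_grams text k → Spec_get_grams text k (get_grams text k)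

-- ===== LEMMAS AND PROOFS =====

-- proof-only helpers: a nested-dict state rebuilt from a flat (pair, count) items list
def pvStepB' (r : PySem.Dict (List Char) (PySem.Dict Char Int)) (q : (List Char × Char) × Int) :
    PySem.Dict (List Char) (PySem.Dict Char Int) :=
  r.insert q.1.1 ((r.getD q.1.1 PySem.Dict.empty).insert q.1.2 q.2)

def pvResh (L : List ((List Char × Char) × Int)) : PySem.Dict (List Char) (PySem.Dict Char Int) :=
  L.foldl pvStepB' PySem.Dict.empty

def pvInner (M : List ((List Char × Char) × Int)) : PySem.Dict Char Int :=
  M.foldl (fun i q => i.insert q.1.2 q.2) PySem.Dict.empty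

-- the list of (gram, trailing char) pairs A's loop runs over
def pvPairs (cs : List Char) (k : Int) : List (List Char × Char) :=
  ((PySem.List.pyRange 0 (PySem.List.len cs - 1) 1).filter
    (fun i => decide (i + k < PySem.List.len cs))).map (pvPair cs k)

-- a guarded fold is a fold over the filtered-and-mapped list
lemma pv_foldl_guard {ι α β : Type} (p : ι → Prop) [DecidablePred p] (h : ι → α) (f : β → α → β) :
    ∀ (xs : List ι) (init : β),
      xs.foldl (fun d x => if p x then f d (h x) else d) init
        = ((xs.filter (fun x => decide (p x))).map h).foldl f init := by
  intro xs; induction xs with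
  | nil => intro init; rfl
  | cons x xs ih =>
    intro init
    by_cases hx : p x <;> simp [List.foldl, hx, ih]

lemma pv_insert_comm {κ ν : Type} [BEq κ] [LawfulBEq κ] (d : PySem.Dict κ ν) (a b : κ) (v w : ν)
    (ha : d.contains a = true) (hne : a ≠ b) :
    (d.insert a v).insert b w = (d.insert b w).insert a v := by
  have hba : (b == a) = false := beq_eq_false_iff_ne.mpr (Ne.symm hne)
  have hab : (a == b) = false := beq_eq_false_iff_ne.mpr hne
  apply PySem.Dict.ext
  by_cases hb : d.contains b = true
  · rw [PySem.Dict.items_insert_of_contains _ w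
        (by rw [PySem.Dict.contains_insert]; simp [hba, hb]),
        PySem.Dict.items_insert_of_contains d v ha,
        PySem.Dict.items_insert_of_contains _ v
        (by rw [PySem.Dict.contains_insert]; simp [hab, ha]),
        PySem.Dict.items_insert_of_contains d w hb,
        List.map_map, List.map_map]
    apply List.map_congr_left
    intro q _
    by_cases h1 : (q.1 == a) = true <;> by_cases h2 : (q.1 == b) = true <;>
      simp_all [Function.comp]
  · have hb' : d.contains b = false := by simpa using hb
    rw [PySem.Dict.items_insert_of_not_contains _ w
        (by rw [PySem.Dict.contains_insert]; simp [hba, hb']),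
        PySem.Dict.items_insert_of_contains d v ha,
        PySem.Dict.items_insert_of_contains _ v
        (by rw [PySem.Dict.contains_insert]; simp [hab, ha]),
        PySem.Dict.items_insert_of_not_contains d w hb',
        List.map_append]
    simp [hba]

lemma pv_getD_resh (L : List ((List Char × Char) × Int)) (g : List Char) :
    (pvResh L).getD g PySem.Dict.empty = pvInner (L.filter (fun q => q.1.1 == g)) := by
  induction L using List.reverseRecOn with
  | nil => simp [pvResh, pvInner, PySem.Dict.getD_empty]
  | append_singleton L q ih =>
    rw [pvResh, List.foldl_append, List.filter_append]
    simp only [List.foldl_cons, List.foldl_nil]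
    rw [← pvResh]
    by_cases hg : q.1.1 = g
    · have hb : (q.1.1 == g) = true := by simp [hg]
      simp only [List.filter_cons, hb, if_true, List.filter_nil]
      rw [pvInner, List.foldl_append]
      simp only [List.foldl_cons, List.foldl_nil]
      rw [← pvInner, pvStepB']
      rw [hg, PySem.Dict.getD_insert_self, ih]
    · have hb : (q.1.1 == g) = false := by simp [hg]
      simp only [List.filter_cons, hb, Bool.false_eq_true, if_false, List.filter_nil,
        List.append_nil]
      rw [pvStepB', PySem.Dict.getD_insert_of_ne _ _ _ (fun h => hg h.symm)]
      exact ih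

lemma pv_contains_resh (L : List ((List Char × Char) × Int)) (g : List Char) :
    (pvResh L).contains g = true ↔ g ∈ L.map (fun q => q.1.1) := by
  have hk : (pvResh L).keys
      = PySem.Set.update (PySem.Dict.empty (κ := List Char) (ν := PySem.Dict Char Int)).keys
          (L.map (fun q => q.1.1)) := by
    unfold pvResh pvStepB'
    exact PySem.Dict.keys_foldl_insert_key L (fun q => q.1.1)
      (fun r q => (r.getD q.1.1 PySem.Dict.empty).insert q.1.2 q.2) PySem.Dict.empty
  rw [PySem.Dict.contains_iff_mem_keys, hk]
  have he : (PySem.Dict.empty (κ := List Char) (ν := PySem.Dict Char Int)).keys = [] := rfl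
  rw [he]
  exact PySem.Set.mem_ofList _ _

lemma pv_contains_inner (M : List ((List Char × Char) × Int)) (c : Char) :
    (pvInner M).contains c = true ↔ c ∈ M.map (fun q => q.1.2) := by
  have hk : (pvInner M).keys
      = PySem.Set.update (PySem.Dict.empty (κ := Char) (ν := Int)).keys
          (M.map (fun q => q.1.2)) := by
    unfold pvInner
    exact PySem.Dict.keys_foldl_insert_key M (fun q => q.1.2) (fun i q => q.2) PySem.Dict.empty
  rw [PySem.Dict.contains_iff_mem_keys, hk]
  have he : (PySem.Dict.empty (κ := Char) (ν := Int)).keys = [] := rfl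
  rw [he]
  exact PySem.Set.mem_ofList _ _

lemma pv_chars_nodup (g : List Char) :
    ∀ (M : List ((List Char × Char) × Int)), (M.map (fun q => q.1)).Nodup →
      ((M.filter (fun q => q.1.1 == g)).map (fun q => q.1.2)).Nodup := by
  intro M
  induction M with
  | nil => simp
  | cons q M ih =>
    intro hnd
    simp only [List.map_cons, List.nodup_cons] at hnd
    rw [List.filter_cons]
    by_cases hb : (q.1.1 == g) = true
    · simp only [hb, if_true, List.map_cons, List.nodup_cons]
      refine ⟨?_, ih hnd.2⟩
      intro hmem
      rcases List.mem_map.mp hmem with ⟨r, hr, hrc⟩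
      rcases List.mem_filter.mp hr with ⟨hrM, hrg⟩
      have h1 : r.1.1 = g := by simpa using hrg
      have h2 : q.1.1 = g := by simpa using hb
      have hre : r.1 = q.1 := Prod.ext_iff.mpr ⟨by rw [h1, h2], hrc⟩
      exact hnd.1 (hre ▸ List.mem_map_of_mem hrM)
    · simp only [hb, Bool.false_eq_true, if_false]
      exact ih hnd.2

lemma pv_inner_items (M : List ((List Char × Char) × Int))
    (hnd : (M.map (fun q => q.1.2)).Nodup) :
    (pvInner M).items = M.map (fun q => (q.1.2, q.2)) := by
  have hfresh : ∀ a ∈ M, (PySem.Dict.empty (κ := Char) (ν := Int)).contains a.1.2 = false := by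
    intro a _; exact PySem.Dict.contains_empty _
  have h := PySem.Dict.items_foldl_insert_fresh M (fun q => q.1.2) (fun q => q.2)
    PySem.Dict.empty hfresh hnd
  unfold pvInner
  rw [h]; rfl

lemma pv_getD_inner (M : List ((List Char × Char) × Int)) (g : List Char) (c : Char) (n : Int)
    (hnd : (M.map (fun q => q.1)).Nodup) (hm : ((g, c), n) ∈ M) :
    (pvInner (M.filter (fun q => q.1.1 == g))).getD c 0 = n := by
  have hnodup := pv_chars_nodup g M hnd
  have hitems' := pv_inner_items (M.filter (fun q => q.1.1 == g)) hnodup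
  have hmemf : ((g, c), n) ∈ M.filter (fun q => q.1.1 == g) :=
    List.mem_filter.mpr ⟨hm, by simp⟩
  have hmem : (c, n) ∈ (pvInner (M.filter (fun q => q.1.1 == g))).items := by
    rw [hitems']
    exact List.mem_map_of_mem (f := fun q => (q.1.2, q.2)) hmemf
  have hkeys : (pvInner (M.filter (fun q => q.1.1 == g))).keys.Nodup := by
    have hk : (pvInner (M.filter (fun q => q.1.1 == g))).keys
        = (M.filter (fun q => q.1.1 == g)).map (fun q => q.1.2) := by
      show (pvInner (M.filter (fun q => q.1.1 == g))).items.map (fun p => p.1) = _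
      rw [hitems']; simp [List.map_map, Function.comp]
    rw [hk]; exact hnodup
  exact PySem.Dict.getD_of_mem_items _ hmem hkeys 0

lemma pv_replace (p : List Char × Char) (n : Int) :
    ∀ (L : List ((List Char × Char) × Int)), (L.map (fun q => q.1)).Nodup → (p, n) ∈ L →
      pvResh (L.map (fun q => if q.1 == p then (p, n + 1) else q))
        = (pvResh L).insert p.1 (((pvResh L).getD p.1 PySem.Dict.empty).insert p.2 (n + 1)) := by
  intro L
  induction L using List.reverseRecOn with
  | nil => intro _ hm; simp at hm
  | append_singleton L q ih =>
    intro hnd hm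
    rw [List.map_append] at hnd
    rcases List.nodup_append.mp hnd with ⟨hndL, -, hdisj⟩
    have hqkey : q.1 ∉ L.map (fun q => q.1) := by
      intro hmem
      exact (hdisj q.1 hmem q.1 (by simp)) rfl
    by_cases hq : q.1 = p
    · have hmL : (p, n) ∉ L := by
        intro hmem
        exact hqkey (by rw [hq]; exact List.mem_map_of_mem (f := fun q => q.1) hmem)
      have hqn : q = (p, n) := by
        rcases List.mem_append.mp hm with h | h
        · exact absurd h hmL
        · exact (List.mem_singleton.mp h).symm
      have hfront : L.map (fun r => if r.1 == p then (p, n + 1) else r) = L := by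
        conv_rhs => rw [← List.map_id L]
        apply List.map_congr_left
        intro r hr
        have hrne : r.1 ≠ p := by
          intro he
          exact hqkey (by rw [hq, ← he]; exact List.mem_map_of_mem (f := fun q => q.1) hr)
        simp [beq_eq_false_iff_ne.mpr hrne]
      rw [List.map_append, hfront, hqn]
      simp only [List.map_cons, List.map_nil, beq_self_eq_true, if_true]
      rw [pvResh, pvResh, List.foldl_append, List.foldl_append]
      simp only [List.foldl_cons, List.foldl_nil]
      rw [← pvResh]
      simp only [pvStepB']
      rw [PySem.Dict.getD_insert_self, PySem.Dict.insert_insert_self,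
        PySem.Dict.insert_insert_self]
    · have hmL : (p, n) ∈ L := by
        rcases List.mem_append.mp hm with h | h
        · exact h
        · exact absurd (congrArg Prod.fst (List.mem_singleton.mp h)).symm hq
      have hqfix : (if q.1 == p then (p, n + 1) else q) = q := by
        simp [beq_eq_false_iff_ne.mpr hq]
      rw [List.map_append]
      simp only [List.map_cons, List.map_nil, hqfix]
      rw [pvResh, pvResh, List.foldl_append, List.foldl_append]
      simp only [List.foldl_cons, List.foldl_nil]
      rw [← pvResh, ← pvResh, ih hndL hmL]
      by_cases hg : q.1.1 = p.1
      · have hc2 : q.1.2 ≠ p.2 := by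
          intro he
          exact hq (Prod.ext_iff.mpr ⟨hg, he⟩)
        have hIc : ((pvResh L).getD p.1 PySem.Dict.empty).contains p.2 = true := by
          rw [pv_getD_resh]
          apply (pv_contains_inner _ _).mpr
          apply List.mem_map.mpr
          exact ⟨(p, n), List.mem_filter.mpr ⟨hmL, by simp⟩, rfl⟩
        simp only [pvStepB', hg]
        rw [PySem.Dict.getD_insert_self, PySem.Dict.insert_insert_self,
          PySem.Dict.getD_insert_self, PySem.Dict.insert_insert_self]
        rw [pv_insert_comm _ p.2 q.1.2 _ _ hIc (fun h => hc2 h.symm)]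
      · have hRg : (pvResh L).contains p.1 = true := by
          apply (pv_contains_resh _ _).mpr
          apply List.mem_map.mpr
          exact ⟨(p, n), hmL, rfl⟩
        simp only [pvStepB']
        rw [PySem.Dict.getD_insert_of_ne _ _ _ (fun h => hg h.symm),
            PySem.Dict.getD_insert_of_ne _ _ _ hg]
        rw [pv_insert_comm _ p.1 q.1.1 _ _ hRg (fun h => hg h.symm)]

lemma pv_L1 (d : PySem.Dict (List Char × Char) Int) (p : List Char × Char)
    (hnd : d.keys.Nodup) :
    pvResh (d.modify p 0 (· + 1)).items = pvStepA (pvResh d.items) p := by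
  have hmod : d.modify p 0 (· + 1) = d.insert p (d.getD p 0 + 1) := rfl
  rw [hmod]
  have hkeyeq : d.keys = d.items.map (fun q => q.1) := rfl
  by_cases hp : d.contains p = true
  · have hsome : (d.get? p).isSome = true := by
      rw [← PySem.Dict.contains_eq_isSome_get? d p]; exact hp
    rcases Option.isSome_iff_exists.mp hsome with ⟨v, hv⟩
    have hgd : d.getD p 0 = v := PySem.Dict.getD_of_get?_eq_some d 0 hv
    have hget : d.get? p = some (d.getD p 0) := by rw [hv, hgd]
    have hmem : (p, d.getD p 0) ∈ d.items := PySem.Dict.mem_items_of_get?_eq_some d hget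
    rw [PySem.Dict.items_insert_of_contains d _ hp]
    rw [pv_replace p (d.getD p 0) d.items (hkeyeq ▸ hnd) hmem]
    have hRg : (pvResh d.items).contains p.1 = true := by
      apply (pv_contains_resh _ _).mpr
      exact List.mem_map.mpr ⟨(p, d.getD p 0), hmem, rfl⟩
    have hIc : ((pvResh d.items).getD p.1 PySem.Dict.empty).contains p.2 = true := by
      rw [pv_getD_resh]
      apply (pv_contains_inner _ _).mpr
      apply List.mem_map.mpr
      exact ⟨(p, d.getD p 0), List.mem_filter.mpr ⟨hmem, by simp⟩, rfl⟩
    have hIv : ((pvResh d.items).getD p.1 PySem.Dict.empty).getD p.2 0 = d.getD p 0 := by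
      rw [pv_getD_resh]
      exact pv_getD_inner d.items p.1 p.2 _ (hkeyeq ▸ hnd) (by simpa using hmem)
    rw [pvStepA]
    simp only [hRg, hIc, Bool.true_eq_false, if_false, hIv]
  · have hp' : d.contains p = false := by simpa using hp
    have hval : d.getD p 0 = 0 := PySem.Dict.getD_of_not_contains d _ hp'
    rw [PySem.Dict.items_insert_of_not_contains d _ hp', hval]
    rw [pvResh, List.foldl_append]
    simp only [List.foldl_cons, List.foldl_nil]
    rw [← pvResh]
    have hIc : ((pvResh d.items).getD p.1 PySem.Dict.empty).contains p.2 = false := by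
      rw [pv_getD_resh, Bool.eq_false_iff]
      intro hc
      rcases List.mem_map.mp ((pv_contains_inner _ _).mp hc) with ⟨r, hr, hrc⟩
      rcases List.mem_filter.mp hr with ⟨hrM, hrg⟩
      have hre : r.1 = p := Prod.ext_iff.mpr ⟨by simpa using hrg, hrc⟩
      have hpk : p ∈ d.items.map (fun q => q.1) := hre ▸ List.mem_map_of_mem hrM
      rw [← hkeyeq] at hpk
      rw [Bool.eq_false_iff] at hp'
      exact hp' ((PySem.Dict.contains_iff_mem_keys d p).mpr hpk)
    simp only [pvStepB']
    by_cases hRg : (pvResh d.items).contains p.1 = true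
    · rw [pvStepA]
      simp only [hRg, hIc, Bool.true_eq_false, if_false, if_true]
      norm_num
    · have hRg' : (pvResh d.items).contains p.1 = false := by simpa using hRg
      rw [pvStepA]
      simp only [hRg', if_true, PySem.Dict.getD_insert_self, PySem.Dict.contains_empty,
        PySem.Dict.insert_insert_self, PySem.Dict.getD_of_not_contains _ _ hRg']
      norm_num

lemma pv_main : ∀ (ps : List (List Char × Char)),
    pvResh (PySem.Dict.counter ps).items = ps.foldl pvStepA PySem.Dict.empty := by
  intro ps
  induction ps using List.reverseRecOn with
  | nil => rfl
  | append_singleton ps p ih =>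
    rw [PySem.Dict.counter_append_singleton, List.foldl_append]
    simp only [List.foldl_cons, List.foldl_nil]
    rw [pv_L1 _ _ (PySem.Dict.nodup_keys_counter ps), ih]

lemma pvA_fold (cs : List Char) (k : Int) :
    (PySem.List.pyRange 0 (PySem.List.len cs - 1) 1).foldl
      (fun d i => if ¬(i + k ≥ PySem.List.len cs) then pvStepA d (pvPair cs k i) else d)
      PySem.Dict.empty
    = (pvPairs cs k).foldl pvStepA PySem.Dict.empty := by
  refine (pv_foldl_guard (fun i => ¬(i + k ≥ PySem.List.len cs)) (pvPair cs k) pvStepA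
    (PySem.List.pyRange 0 (PySem.List.len cs - 1) 1) PySem.Dict.empty).trans ?_
  rw [pvPairs]
  congr 1
  congr 1
  apply List.filter_congr
  intro i _
  exact decide_eq_decide.mpr not_le

-- ---- dedup (PySem.Set.ofList) structure lemmas ----

lemma pv_contains_iff {α : Type} [BEq α] [LawfulBEq α] (s : PySem.Set α) (x : α) :
    PySem.Set.contains s x = true ↔ x ∈ s := by
  constructor <;> intro h <;> simp_all [PySem.Set.contains]

lemma pv_add_of_mem {α : Type} [BEq α] [LawfulBEq α] (s : PySem.Set α) (x : α) (h : x ∈ s) :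
    PySem.Set.add s x = s := by
  show (if PySem.Set.contains s x then s else s ++ [x]) = s
  rw [if_pos ((pv_contains_iff s x).mpr h)]

lemma pv_add_of_not_mem {α : Type} [BEq α] [LawfulBEq α] (s : PySem.Set α) (x : α) (h : x ∉ s) :
    PySem.Set.add s x = s ++ [x] := by
  show (if PySem.Set.contains s x then s else s ++ [x]) = s ++ [x]
  rw [if_neg (fun hc => h ((pv_contains_iff s x).mp hc))]

lemma pv_ofList_append {α : Type} [BEq α] [LawfulBEq α] (xs : List α) (x : α) :
    PySem.Set.ofList (xs ++ [x]) = PySem.Set.add (PySem.Set.ofList xs) x := by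
  rw [PySem.Set.ofList_eq_foldl, PySem.Set.ofList_eq_foldl, List.foldl_append]
  rfl

lemma pv_ofList_map_ofList {α β : Type} [BEq α] [LawfulBEq α] [BEq β] [LawfulBEq β] (f : α → β) :
    ∀ (xs : List α),
      PySem.Set.ofList ((PySem.Set.ofList xs).map f) = PySem.Set.ofList (xs.map f) := by
  intro xs
  induction xs using List.reverseRecOn with
  | nil => rfl
  | append_singleton xs x ih =>
    rw [pv_ofList_append, List.map_append, List.map_singleton, pv_ofList_append]
    by_cases hx : x ∈ PySem.Set.ofList xs
    · rw [pv_add_of_mem _ _ hx, ih]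
      have : f x ∈ PySem.Set.ofList (xs.map f) := by
        rw [PySem.Set.mem_ofList]
        exact List.mem_map_of_mem ((PySem.Set.mem_ofList xs x).mp hx)
      rw [pv_add_of_mem _ _ (ih ▸ this)]
    · rw [pv_add_of_not_mem _ _ hx, List.map_append, List.map_singleton, pv_ofList_append, ih]

lemma pv_ofList_filter {α : Type} [BEq α] [LawfulBEq α] (p : α → Bool) :
    ∀ (xs : List α),
      PySem.Set.ofList (xs.filter p) = (PySem.Set.ofList xs).filter p := by
  intro xs
  induction xs using List.reverseRecOn with
  | nil => rfl
  | append_singleton xs x ih =>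
    rw [List.filter_append, pv_ofList_append]
    by_cases hx : x ∈ PySem.Set.ofList xs
    · rw [pv_add_of_mem _ _ hx, ← ih]
      by_cases hp : p x = true
      · simp only [List.filter_cons, hp, if_true, List.filter_nil]
        rw [pv_ofList_append, pv_add_of_mem]
        rw [PySem.Set.mem_ofList, List.mem_filter]
        exact ⟨(PySem.Set.mem_ofList xs x).mp hx, hp⟩
      · simp [List.filter_cons, hp]
    · rw [pv_add_of_not_mem _ _ hx, List.filter_append, ← ih]
      by_cases hp : p x = true
      · simp only [List.filter_cons, hp, if_true, List.filter_nil]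
        rw [pv_ofList_append, pv_add_of_not_mem]
        rw [PySem.Set.mem_ofList, List.mem_filter]
        intro hc
        exact hx ((PySem.Set.mem_ofList xs x).mpr hc.1)
      · simp [List.filter_cons, hp]

lemma pv_ofList_map_inj {α β : Type} [BEq α] [LawfulBEq α] [BEq β] [LawfulBEq β] (f : α → β)
    (xs : List α) (hinj : ∀ a ∈ xs, ∀ b ∈ xs, f a = f b → a = b) :
    PySem.Set.ofList (xs.map f) = (PySem.Set.ofList xs).map f := by
  induction xs using List.reverseRecOn with
  | nil => rfl
  | append_singleton xs x ih =>
    have hinj' : ∀ a ∈ xs, ∀ b ∈ xs, f a = f b → a = b := by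
      intro a ha b hb
      exact hinj a (List.mem_append_left _ ha) b (List.mem_append_left _ hb)
    rw [List.map_append, List.map_singleton, pv_ofList_append, pv_ofList_append, ih hinj']
    by_cases hx : x ∈ PySem.Set.ofList xs
    · rw [pv_add_of_mem _ _ hx, pv_add_of_mem]
      exact List.mem_map_of_mem hx
    · rw [pv_add_of_not_mem _ _ hx, pv_add_of_not_mem, List.map_append, List.map_singleton]
      intro hc
      rcases List.mem_map.mp hc with ⟨a, ha, hfa⟩
      have hax : a ∈ xs := (PySem.Set.mem_ofList xs a).mp ha
      have : a = x := hinj a (List.mem_append_left _ hax) x (List.mem_append_right _ (by simp)) hfa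
      exact hx (this ▸ ha)

lemma pv_count_snd (g : List Char) (c : Char) : ∀ (ps : List (List Char × Char)),
    ((ps.filter (fun q => q.1 == g)).map (fun q => q.2)).count c = ps.count (g, c) := by
  intro ps
  induction ps with
  | nil => rfl
  | cons q ps ih =>
    rw [List.filter_cons, List.count_cons]
    by_cases hg : q.1 = g
    · simp only [hg, beq_self_eq_true, if_true, List.map_cons, List.count_cons, ih]
      by_cases hc : q.2 = c
      · have : q = (g, c) := Prod.ext_iff.mpr ⟨hg, hc⟩
        simp [this, hc]
      · have h1 : (q.2 == c) = false := by simp [hc]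
        have h2 : (q == (g, c)) = false := by
          apply beq_eq_false_iff_ne.mpr
          intro he; exact hc (congrArg Prod.snd he)
        simp [h1, h2]
    · have h1 : (q.1 == g) = false := by simp [hg]
      have h2 : (q == (g, c)) = false := by
        apply beq_eq_false_iff_ne.mpr
        intro he; exact hg (congrArg Prod.fst he)
      simp [h1, h2, ih]

-- items of the reshaped dict, grouped by distinct gram (first-seen order)
lemma pv_items_resh : ∀ (L : List ((List Char × Char) × Int)),
    (L.map (fun q => q.1)).Nodup →
      (pvResh L).items
        = (PySem.Set.ofList (L.map (fun q => q.1.1))).map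
            (fun g => (g, pvInner (L.filter (fun q => q.1.1 == g)))) := by
  intro L
  induction L using List.reverseRecOn with
  | nil => intro _; rfl
  | append_singleton L q ih =>
    intro hnd
    rw [List.map_append] at hnd
    rcases List.nodup_append.mp hnd with ⟨hndL, -, -⟩
    have hfoldl : pvResh (L ++ [q]) = pvStepB' (pvResh L) q := by
      rw [pvResh, List.foldl_append]; rfl
    rw [hfoldl, List.map_append, List.map_singleton, pv_ofList_append]
    by_cases hg : q.1.1 ∈ L.map (fun r => r.1.1)
    · -- gram seen before: in-place overwrite of the inner dict
      have hgS : q.1.1 ∈ PySem.Set.ofList (L.map (fun r => r.1.1)) :=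
        (PySem.Set.mem_ofList _ _).mpr hg
      rw [pv_add_of_mem _ _ hgS]
      have hc : (pvResh L).contains q.1.1 = true := (pv_contains_resh L q.1.1).mpr hg
      rw [pvStepB', PySem.Dict.items_insert_of_contains _ _ hc, ih hndL, List.map_map]
      apply List.map_congr_left
      intro g hgmem
      by_cases he : g = q.1.1
      · have hb : (g == q.1.1) = true := by simp [he]
        simp only [Function.comp, hb, if_true]
        have hqf : [q].filter (fun r => r.1.1 == g) = [q] := by simp [he]
        have hfa : (L ++ [q]).filter (fun r => r.1.1 == g)
            = L.filter (fun r => r.1.1 == g) ++ [q] := by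
          rw [List.filter_append, hqf]
        have hstep : pvInner (L.filter (fun r => r.1.1 == g) ++ [q])
            = (pvInner (L.filter (fun r => r.1.1 == g))).insert q.1.2 q.2 := by
          unfold pvInner
          rw [List.foldl_append]
          simp only [List.foldl_cons, List.foldl_nil]
        refine Prod.ext_iff.mpr ⟨he.symm, ?_⟩
        dsimp only
        rw [hfa, hstep, ← pv_getD_resh, he]
      · have hb : (g == q.1.1) = false := by simp [he]
        simp only [Function.comp, hb, Bool.false_eq_true, if_false]
        congr 1
        rw [List.filter_append]
        have hne' : ¬ q.1.1 = g := fun h => he h.symm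
        have hqf : [q].filter (fun r => r.1.1 == g) = [] := by simp [hne']
        rw [hqf, List.append_nil]
    · -- new gram: appended at the end
      have hgS : q.1.1 ∉ PySem.Set.ofList (L.map (fun r => r.1.1)) := by
        rw [PySem.Set.mem_ofList]; exact hg
      rw [pv_add_of_not_mem _ _ hgS]
      have hc : (pvResh L).contains q.1.1 = false := by
        rw [Bool.eq_false_iff]
        intro hcc
        exact hg ((pv_contains_resh L q.1.1).mp hcc)
      rw [pvStepB', PySem.Dict.items_insert_of_not_contains _ _ hc, ih hndL, List.map_append,
        List.map_singleton]
      congr 1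
      · apply List.map_congr_left
        intro g hgmem
        congr 1
        rw [List.filter_append]
        have hgne : g ≠ q.1.1 := by
          intro he
          exact hg (he ▸ (PySem.Set.mem_ofList _ _).mp hgmem)
        have hgne' : ¬ q.1.1 = g := fun h => hgne h.symm
        have hqf : [q].filter (fun r => r.1.1 == g) = [] := by simp [hgne']
        rw [hqf, List.append_nil]
      · have hLf : L.filter (fun r => r.1.1 == q.1.1) = [] := by
          rw [List.filter_eq_nil_iff]
          intro r hr hc2
          exact hg (by
            have : r.1.1 = q.1.1 := by simpa using hc2
            exact this ▸ List.mem_map_of_mem hr)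
        rw [List.filter_append, hLf, List.nil_append]
        have hqf : [q].filter (fun r => r.1.1 == q.1.1) = [q] := by simp
        rw [hqf, PySem.Dict.getD_of_not_contains _ _ hc]
        rfl

-- B's grouping dict rebuilt from the flat pair list
def pvGrp (ps : List (List Char × Char)) : PySem.Dict (List Char) (List Char) :=
  ps.foldl (fun d p => d.insert p.1 (d.getD p.1 [] ++ [p.2])) PySem.Dict.empty

lemma pv_grp_contains (ps : List (List Char × Char)) (g : List Char) :
    (pvGrp ps).contains g = true ↔ g ∈ ps.map (fun p => p.1) := by
  have hk : (pvGrp ps).keys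
      = PySem.Set.update (PySem.Dict.empty (κ := List Char) (ν := List Char)).keys
          (ps.map (fun p => p.1)) := by
    unfold pvGrp
    exact PySem.Dict.keys_foldl_insert_key ps (fun p => p.1)
      (fun d p => d.getD p.1 [] ++ [p.2]) PySem.Dict.empty
  rw [PySem.Dict.contains_iff_mem_keys, hk]
  have he : (PySem.Dict.empty (κ := List Char) (ν := List Char)).keys = [] := rfl
  rw [he]
  exact PySem.Set.mem_ofList _ _

lemma pv_grp_getD (g : List Char) : ∀ (ps : List (List Char × Char)),
    (pvGrp ps).getD g [] = (ps.filter (fun p => p.1 == g)).map (fun p => p.2) := by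
  intro ps
  induction ps using List.reverseRecOn with
  | nil => simp [pvGrp, PySem.Dict.getD_empty]
  | append_singleton ps p ih =>
    have hfoldl : pvGrp (ps ++ [p]) = (pvGrp ps).insert p.1 ((pvGrp ps).getD p.1 [] ++ [p.2]) := by
      rw [pvGrp, List.foldl_append]; rfl
    rw [hfoldl, List.filter_append]
    by_cases hg : p.1 = g
    · have hb : (p.1 == g) = true := by simp [hg]
      simp only [List.filter_cons, hb, if_true, List.filter_nil]
      rw [hg, PySem.Dict.getD_insert_self, ih, List.map_append, List.map_singleton]
    · have hb : (p.1 == g) = false := by simp [hg]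
      simp only [List.filter_cons, hb, Bool.false_eq_true, if_false, List.filter_nil,
        List.append_nil]
      rw [PySem.Dict.getD_insert_of_ne _ _ _ (fun h => hg h.symm), ih]

lemma pv_grp_items : ∀ (ps : List (List Char × Char)),
    (pvGrp ps).items
      = (PySem.Set.ofList (ps.map (fun p => p.1))).map
          (fun g => (g, (ps.filter (fun p => p.1 == g)).map (fun p => p.2))) := by
  intro ps
  induction ps using List.reverseRecOn with
  | nil => rfl
  | append_singleton ps p ih =>
    have hfoldl : pvGrp (ps ++ [p]) = (pvGrp ps).insert p.1 ((pvGrp ps).getD p.1 [] ++ [p.2]) := by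
      rw [pvGrp, List.foldl_append]; rfl
    rw [hfoldl, List.map_append, List.map_singleton, pv_ofList_append]
    by_cases hg : p.1 ∈ ps.map (fun r => r.1)
    · have hgS : p.1 ∈ PySem.Set.ofList (ps.map (fun r => r.1)) :=
        (PySem.Set.mem_ofList _ _).mpr hg
      rw [pv_add_of_mem _ _ hgS]
      have hc : (pvGrp ps).contains p.1 = true := (pv_grp_contains ps p.1).mpr hg
      rw [PySem.Dict.items_insert_of_contains _ _ hc, ih, List.map_map]
      apply List.map_congr_left
      intro g hgmem
      by_cases he : g = p.1
      · have hb : (g == p.1) = true := by simp [he]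
        simp only [Function.comp, hb, if_true]
        refine Prod.ext_iff.mpr ⟨he.symm, ?_⟩
        dsimp only
        rw [pv_grp_getD, List.filter_append]
        have hqf : [p].filter (fun r => r.1 == g) = [p] := by simp [he]
        rw [hqf, he, List.map_append, List.map_singleton]
      · have hb : (g == p.1) = false := by simp [he]
        simp only [Function.comp, hb, Bool.false_eq_true, if_false]
        congr 1
        rw [List.filter_append]
        have hne' : ¬ p.1 = g := fun h => he h.symm
        have hqf : [p].filter (fun r => r.1 == g) = [] := by simp [hne']
        rw [hqf, List.append_nil]
    · have hgS : p.1 ∉ PySem.Set.ofList (ps.map (fun r => r.1)) := by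
        rw [PySem.Set.mem_ofList]; exact hg
      rw [pv_add_of_not_mem _ _ hgS]
      have hc : (pvGrp ps).contains p.1 = false := by
        rw [Bool.eq_false_iff]
        intro hcc
        exact hg ((pv_grp_contains ps p.1).mp hcc)
      rw [PySem.Dict.items_insert_of_not_contains _ _ hc, ih, List.map_append,
        List.map_singleton]
      congr 1
      · apply List.map_congr_left
        intro g hgmem
        congr 1
        rw [List.filter_append]
        have hgne : g ≠ p.1 := by
          intro he
          exact hg (he ▸ (PySem.Set.mem_ofList _ _).mp hgmem)
        have hne' : ¬ p.1 = g := fun h => hgne h.symm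
        have hqf : [p].filter (fun r => r.1 == g) = [] := by simp [hne']
        rw [hqf, List.append_nil]
      · have hLf : ps.filter (fun r => r.1 == p.1) = [] := by
          rw [List.filter_eq_nil_iff]
          intro r hr hc2
          exact hg (by
            have : r.1 = p.1 := by simpa using hc2
            exact this ▸ List.mem_map_of_mem hr)
        rw [List.filter_append, hLf, List.nil_append]
        have hqf : [p].filter (fun r => r.1 == p.1) = [p] := by simp
        rw [hqf, PySem.Dict.getD_of_not_contains _ _ hc]
        rfl

-- ===== VERDICT (by name: the statement is the Claim_ definition above) =====
theorem get_grams_spec : Claim_equal_get_grams := by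
  intro text k _ _
  unfold Spec_get_grams
  show get_grams text k = get_grams_alt text k
  simp only [get_grams, get_grams_alt]
  rw [pvA_fold, ← pv_main]
  set cs := text.toList with hcs
  set ps := pvPairs cs k with hps
  -- B's guarded grouping fold is pvGrp over the same pair list
  have hB : ((PySem.List.pyRange 0 (PySem.List.len cs - 1) 1).foldl
      (fun (d : PySem.Dict (List Char) (List Char)) i =>
        if i + k < PySem.List.len cs then
          d.insert (PySem.List.slice cs (some i) (some (i + k)))
            (d.getD (PySem.List.slice cs (some i) (some (i + k))) []
              ++ [PySem.List.pyGetD cs (i + k) ' '])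
        else d)
      PySem.Dict.empty) = pvGrp ps :=
    pv_foldl_guard (fun i => i + k < PySem.List.len cs) (pvPair cs k)
      (fun (d : PySem.Dict (List Char) (List Char)) (p : List Char × Char) =>
        d.insert p.1 (d.getD p.1 [] ++ [p.2])) _ _
  rw [hB, pv_grp_items ps]
  -- the flat (pair, count) table on A's side
  have hL : (PySem.Dict.counter ps).items
      = (PySem.Set.ofList ps).map (fun p => (p, (ps.count p : Int))) :=
    PySem.Dict.items_counter ps
  have hkeysnd : (((PySem.Set.ofList ps).map (fun p => (p, (ps.count p : Int)))).map
      (fun q => q.1)).Nodup := by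
    rw [List.map_map]
    have : ((fun q => q.1) ∘ (fun p => (p, (ps.count p : Int)))) = id := rfl
    rw [this, List.map_id]
    exact PySem.Set.nodup_ofList ps
  have hgrams : ((PySem.Set.ofList ps).map (fun p => (p, (ps.count p : Int)))).map
      (fun q => q.1.1) = (PySem.Set.ofList ps).map (fun p => p.1) := by
    rw [List.map_map]; rfl
  rw [hL, pv_items_resh _ hkeysnd, hgrams, pv_ofList_map_ofList]
  simp only [List.map_map]
  apply List.map_congr_left
  intro g hgmem
  simp only [Function.comp]
  refine Prod.ext_iff.mpr ⟨rfl, ?_⟩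
  dsimp only
  -- B's per-group counting fold is the counter of the group's char list
  have hcnt1 : ((ps.filter (fun p => p.1 == g)).map (fun p => p.2)).foldl
      (fun (cnt : PySem.Dict Char Int) c => cnt.insert c (cnt.getD c 0 + 1)) PySem.Dict.empty
      = PySem.Dict.counter ((ps.filter (fun p => p.1 == g)).map (fun p => p.2)) :=
    PySem.Dict.foldl_insert_getD_add_one_eq_counter _
  rw [hcnt1, PySem.Dict.items_counter]
  -- A's inner dict for gram g, as a list over the distinct fiber pairs
  have hfilt : ((PySem.Set.ofList ps).map (fun p => (p, (ps.count p : Int)))).filter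
      (fun q => q.1.1 == g)
      = ((PySem.Set.ofList ps).filter (fun p => p.1 == g)).map
          (fun p => (p, (ps.count p : Int))) := by
    rw [List.filter_map]; rfl
  have hfibnd : (((PySem.Set.ofList ps).filter (fun p => p.1 == g)).map
      (fun p => (p, (ps.count p : Int)))).map (fun q => q.1.2) |>.Nodup := by
    rw [List.map_map]
    have he : ((fun (q : (List Char × Char) × Int) => q.1.2) ∘
        (fun p => (p, (ps.count p : Int)))) = (fun (p : List Char × Char) => p.2) := rfl
    rw [he]
    apply List.Nodup.map_on
    · intro a ha b hb hab
      have ha1 : a.1 = g := by simpa using (List.mem_filter.mp ha).2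
      have hb1 : b.1 = g := by simpa using (List.mem_filter.mp hb).2
      exact Prod.ext_iff.mpr ⟨ha1.trans hb1.symm, hab⟩
    · exact List.Nodup.filter _ (PySem.Set.nodup_ofList ps)
  rw [hfilt, pv_inner_items _ hfibnd]
  -- B's distinct chars for gram g are the snd's of the distinct fiber pairs
  have hchars : PySem.Set.ofList ((ps.filter (fun q => q.1 == g)).map (fun q => q.2))
      = ((PySem.Set.ofList ps).filter (fun p => p.1 == g)).map (fun p => p.2) := by
    rw [pv_ofList_map_inj (fun q => q.2) (ps.filter (fun q => q.1 == g)) ?_, pv_ofList_filter]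
    intro a ha b hb hab
    have ha1 : a.1 = g := by simpa using (List.mem_filter.mp ha).2
    have hb1 : b.1 = g := by simpa using (List.mem_filter.mp hb).2
    exact Prod.ext_iff.mpr ⟨ha1.trans hb1.symm, hab⟩
  rw [hchars]
  simp only [List.map_map]
  apply List.map_congr_left
  intro p hpmem
  have hp1 : p.1 = g := by simpa using (List.mem_filter.mp hpmem).2
  simp only [Function.comp]
  refine Prod.ext_iff.mpr ⟨rfl, ?_⟩
  dsimp only
  have hcnt := pv_count_snd g p.2 ps
  have hpe : (g, p.2) = p := Prod.ext_iff.mpr ⟨hp1.symm, rfl⟩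
  rw [hpe] at hcnt
  rw [hcnt]
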